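-- pv_equiv track=rewrite | github.com/MrBrantCode/unitest_baseline | mut_generate/mist_train_cf/cf_85329/solution.py | reverse_dict_and_compute_product
-- ===== SOURCE A (Python) =====
-- from functools import reduce
-- import operator
--
-- def reverse_dict_and_compute_product(input_dict):
--     sorted_keys = sorted(input_dict.keys())
--     reverse_dict = {}
--     for key in reversed(sorted_keys):
--         values_to_multiply = [input_dict[k] for k in sorted_keys if k <= key]
--         product = reduce(operator.mul, values_to_multiply, 1)
--         reverse_dict[key] = product
--     return reverse_dict
-- ===== SOURCE B (Python) =====
-- def reverse_dict_and_compute_product(input_dict):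
--     result = []
--     product = 1
--     for key in sorted(input_dict):
--         product *= input_dict[key]
--         result.append((key, product))
--     return dict(reversed(result))
-- ===== Notes on version B (the rewrite author's own statement) =====
-- stated objective: faster
-- what changed: Replaces A's per-key rescan of all smaller keys (filter + reduce for every key) with a single pass over the sorted keys maintaining a running prefix product, then reverses the result list.
import Mathlib
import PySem

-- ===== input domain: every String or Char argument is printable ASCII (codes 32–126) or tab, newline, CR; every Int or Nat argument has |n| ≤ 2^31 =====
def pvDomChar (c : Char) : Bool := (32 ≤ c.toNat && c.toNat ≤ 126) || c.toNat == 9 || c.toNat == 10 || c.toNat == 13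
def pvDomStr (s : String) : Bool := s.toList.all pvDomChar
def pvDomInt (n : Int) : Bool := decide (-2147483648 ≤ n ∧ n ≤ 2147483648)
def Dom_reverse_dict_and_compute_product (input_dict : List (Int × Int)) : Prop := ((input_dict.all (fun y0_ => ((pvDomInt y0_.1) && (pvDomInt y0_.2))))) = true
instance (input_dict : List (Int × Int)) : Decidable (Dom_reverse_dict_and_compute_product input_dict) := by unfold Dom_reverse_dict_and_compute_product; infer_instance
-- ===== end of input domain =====

-- B replaces A's per-key rescan (quadratic) with one running prefix product over the sorted keys; objective: faster.


-- ===== PORT A =====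
def reverse_dict_and_compute_product (input_dict : List (Int × Int)) : List (Int × Int) :=
  let d := PySem.Dict.ofList input_dict
  let sorted_keys := PySem.List.sorted d.keys (fun k => k) false
  let reverse_dict := sorted_keys.reverse.foldl
    (fun rd key =>
      let values_to_multiply := (sorted_keys.filter (fun k => decide (k ≤ key))).map (fun k => d.getD k 0)
      let product := values_to_multiply.foldl (fun a b => a * b) 1
      rd.insert key product)
    PySem.Dict.empty
  reverse_dict.items

-- ===== PORT B =====
def reverse_dict_and_compute_product_alt (input_dict : List (Int × Int)) : List (Int × Int) :=
  let d := PySem.Dict.ofList input_dict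
  let st := (PySem.List.sorted d.keys (fun k => k) false).foldl
    (fun (st : List (Int × Int) × Int) key =>
      let product := st.2 * d.getD key 0
      (st.1 ++ [(key, product)], product))
    ([], 1)
  st.1.reverse

-- ===== PRECONDITION & SPEC =====
def Spec_reverse_dict_and_compute_product (input_dict : List (Int × Int)) (out : List (Int × Int)) : Prop := out = reverse_dict_and_compute_product_alt input_dict
instance (input_dict : List (Int × Int)) (out : List (Int × Int)) : Decidable (Spec_reverse_dict_and_compute_product input_dict out) := by unfold Spec_reverse_dict_and_compute_product; infer_instance

-- ===== CLAIM (what is proved, stated in full; the proofs are below) =====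
def Claim_equal_reverse_dict_and_compute_product : Prop := ∀ (input_dict : List (Int × Int)), Dom_reverse_dict_and_compute_product input_dict → Spec_reverse_dict_and_compute_product input_dict (reverse_dict_and_compute_product input_dict)

-- ===== LEMMAS AND PROOFS =====

-- the common shape both loops produce: keys paired with running prefix products of f, seeded at p
def pvSpecList (f : Int → Int) : List Int → Int → List (Int × Int)
  | [], _ => []
  | k :: t, p => (k, p * f k) :: pvSpecList f t (p * f k)

theorem pvB_loop (f : Int → Int) (ks : List Int) (acc : List (Int × Int)) (p : Int) :
    (ks.foldl (fun st key => (st.1 ++ [(key, st.2 * f key)], st.2 * f key)) (acc, p)).1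
      = acc ++ pvSpecList f ks p := by
  induction ks generalizing acc p with
  | nil => simp [pvSpecList]
  | cons k t ih => simp [pvSpecList, ih]

theorem pairwise_lt_of_le_nodup (l : List Int) (h1 : l.Pairwise (· ≤ ·)) (h2 : l.Nodup) :
    l.Pairwise (· < ·) :=
  (h1.and h2).imp (fun ⟨hle, hne⟩ => lt_of_le_of_ne hle hne)

theorem pvA_map (f : Int → Int) (ks : List Int) (h : ks.Pairwise (· < ·)) (p : Int) :
    ks.map (fun key => (key,
        ((ks.filter (fun x => decide (x ≤ key))).map f).foldl (fun a b => a * b) p))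
      = pvSpecList f ks p := by
  induction ks generalizing p with
  | nil => simp [pvSpecList]
  | cons k t ih =>
    rcases List.pairwise_cons.mp h with ⟨hk, ht⟩
    simp only [List.map_cons, pvSpecList]
    congr 1
    · have hfilt : t.filter (fun x => decide (x ≤ k)) = [] := by
        apply List.filter_eq_nil_iff.mpr
        intro x hx
        simp only [decide_eq_true_eq] at *
        exact fun hle => absurd hle (not_le.mpr (hk x hx))
      simp [hfilt]
    · rw [← ih ht (p * f k)]
      apply List.map_congr_left
      intro key hkey
      have hklt : k < key := hk key hkey
      have : (k :: t).filter (fun x => decide (x ≤ key))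
          = k :: t.filter (fun x => decide (x ≤ key)) := by
        simp [le_of_lt hklt]
      simp [this]

theorem pvSorted_pairwise_lt (input_dict : List (Int × Int)) :
    (PySem.List.sorted (PySem.Dict.ofList input_dict).keys (fun k => k) false).Pairwise (· < ·) := by
  apply pairwise_lt_of_le_nodup
  · exact PySem.List.sorted_pairwise _ _
  · exact ((PySem.List.sorted_perm _ _ _).nodup_iff).mpr (PySem.Dict.nodup_keys_ofList _)

-- ===== VERDICT (by name: the statement is the Claim_ definition above) =====
theorem reverse_dict_and_compute_product_spec : Claim_equal_reverse_dict_and_compute_product := by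
  intro input_dict _
  unfold Spec_reverse_dict_and_compute_product
  unfold reverse_dict_and_compute_product reverse_dict_and_compute_product_alt
  set d := PySem.Dict.ofList input_dict with hd
  set ks := PySem.List.sorted d.keys (fun k => k) false with hks
  have hlt : ks.Pairwise (· < ·) := pvSorted_pairwise_lt input_dict
  have hnd : ks.Nodup := hlt.imp ne_of_lt
  set f : Int → Int := fun k => d.getD k 0 with hf
  set v : Int → Int := fun key =>
    ((ks.filter (fun x => decide (x ≤ key))).map f).foldl (fun a b => a * b) 1 with hv
  -- A's loop inserts fresh distinct keys, so its items are just the appended pairs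
  have hA : (ks.reverse.foldl
      (fun rd key =>
        rd.insert key (((ks.filter (fun k => decide (k ≤ key))).map (fun k => d.getD k 0)).foldl
          (fun a b => a * b) 1))
      PySem.Dict.empty).items
      = ks.reverse.map (fun key => (key, v key)) := by
    have := PySem.Dict.items_foldl_insert_fresh (l := ks.reverse) (k := fun x => x) (v := v)
      (d := PySem.Dict.empty)
      (by intro a _; exact PySem.Dict.contains_empty a)
      (by simpa using List.nodup_reverse.mpr hnd)
    simpa [hv, hf] using this
  calc (ks.reverse.foldl
      (fun rd key =>
        rd.insert key (((ks.filter (fun k => decide (k ≤ key))).map (fun k => d.getD k 0)).foldl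
          (fun a b => a * b) 1))
      PySem.Dict.empty).items
      = ks.reverse.map (fun key => (key, v key)) := hA
    _ = (ks.map (fun key => (key, v key))).reverse := by rw [List.map_reverse]
    _ = (pvSpecList f ks 1).reverse := by rw [hv, pvA_map f ks hlt 1]
    _ = (ks.foldl (fun st key => (st.1 ++ [(key, st.2 * f key)], st.2 * f key)) ([], 1)).1.reverse := by
        rw [pvB_loop f ks [] 1]; simp
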